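-- pv_equiv track=rewrite | github.com/Alvas07/ITMO | 1 Informatics/Labs/Lab1/lab1.py | convert_decimal_to_fibonacci
-- ===== SOURCE A (Python) =====
-- def convert_decimal_to_fibonacci(n):
--     try:
--         # проверяем, что пользователь ввёл целое число
--         assert n.isdigit()
--
--         # преобразуем строку в число
--         n = int(n)
--
--         # отдельно обрабатываем случаи с n = 0 и n < 0
--         if n == 0:
--             return "0"
--         elif n < 0:
--             raise AssertionError
--
--         # инициализируем первые два числа фибоначчи
--         # пропускаем 0 и 1, которые не нужны для перевода
--         fib1, fib2 = 1, 2
--         count_of_digits = 2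
--         res = ""
--
--         # считаем самое близкое к данному число фибоначчи,
--         # а также кол-во цифр в итоговом числе
--         while fib2 <= n:
--             fib1, fib2 = fib2, fib1 + fib2
--             count_of_digits += 1
--
--         # учитываем возможное превышение исходного числа
--         if fib2 > n:
--             fib1, fib2 = fib2 - fib1, fib1
--             count_of_digits -= 1
--
--         # формируем итоговое число, поочерёдно вычитая
--         # самые близкие к исходному числа фибоначчи
--         # вычли - приписываем 1, иначе 0
--         while n > 0:
--             if n >= fib2:
--                 n -= fib2
--                 res += "1"
--             else:
--                 res += "0"
--
--             # переходим к предыдущей паре чисел фибоначчи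
--             fib1, fib2 = fib2 - fib1, fib1
--             count_of_digits -= 1
--
--         # если в итоговом числе не хватает цифр,
--         # то дописываем справа нули
--         res += "0" * count_of_digits
--
--         return res
--
--     # обрабатываем исключение, если ввели плохое число
--     except AssertionError:
--         return "Введённое число должно быть целым и неотрицательным."
-- ===== SOURCE B (Python) =====
-- def convert_decimal_to_fibonacci(n):
--     try:
--         # same input validation as before
--         assert n.isdigit()
--         n = int(n)
--         if n == 0:
--             return "0"
--         elif n < 0:
--             raise AssertionError
--
--         # collect every Fibonacci number (1, 2, 3, 5, ...) not exceeding n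
--         fibs = []
--         a, b = 1, 2
--         while a <= n:
--             fibs.append(a)
--             a, b = b, a + b
--
--         # greedy subtraction over the list from the largest down;
--         # the list's full length makes trailing zeros automatic
--         res = ""
--         for f in reversed(fibs):
--             if n >= f:
--                 n -= f
--                 res += "1"
--             else:
--                 res += "0"
--         return res
--
--     except AssertionError:
--         return "Введённое число должно быть целым и неотрицательным."
-- ===== Notes on version B (the rewrite author's own statement) =====
-- stated objective: simpler
-- what changed: B first materialises the list of Fibonacci numbers <= n and then does one greedy pass over it in reverse, so A's count_of_digits bookkeeping, the post-loop pair back-shift and the backward fib2-fib1 regeneration with trailing-zero padding all disappear.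
import Mathlib
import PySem

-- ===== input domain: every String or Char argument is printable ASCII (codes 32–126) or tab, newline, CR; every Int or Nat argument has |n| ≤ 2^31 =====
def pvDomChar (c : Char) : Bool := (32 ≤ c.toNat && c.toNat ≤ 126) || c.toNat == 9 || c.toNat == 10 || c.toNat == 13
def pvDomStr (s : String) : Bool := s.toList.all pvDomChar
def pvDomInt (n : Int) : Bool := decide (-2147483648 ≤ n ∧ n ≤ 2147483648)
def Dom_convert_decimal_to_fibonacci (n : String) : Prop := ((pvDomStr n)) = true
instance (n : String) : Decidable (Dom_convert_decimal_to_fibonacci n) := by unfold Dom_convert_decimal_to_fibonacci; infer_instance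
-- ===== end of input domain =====

-- B replaces A's counter/back-shift/regeneration machinery by one greedy pass over the
-- materialised list of Fibonacci numbers ≤ n (objective: simpler); same return value everywhere.

-- ===== PORT A =====
-- the AssertionError message returned by the except-branch
def pvErrMsg : String := "Введённое число должно быть целым и неотрицательным."

-- 'while fib2 <= n: fib1, fib2 = fib2, fib1 + fib2; count += 1'
-- (the '0 < fib1' conjunct is only a termination guard: it holds at the call site and
--  at every reachable state, so the port computes exactly what the Python loop computes)
def pvFibUp (n fib1 fib2 count : Int) : Int × Int × Int :=
  if _h : fib2 ≤ n ∧ 0 < fib1 then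
    pvFibUp n fib2 (fib1 + fib2) (count + 1)
  else (fib1, fib2, count)
termination_by (n + 2 - fib2).toNat
decreasing_by omega

-- 'while n > 0: …' plus the final 'res += "0" * count_of_digits'
-- (the '0 < count' conjunct is only a termination guard: whenever n > 0 in a reachable
--  state, count > 0, so the port computes exactly what the Python loop computes; Python's
--  '"0" * count' for count ≤ 0 is "" = replicate count.toNat '0')
def pvFibDown (res : List Char) (n fib1 fib2 count : Int) : List Char :=
  if _h : 0 < n ∧ 0 < count then
    if fib2 ≤ n then pvFibDown (res ++ ['1']) (n - fib2) (fib2 - fib1) fib1 (count - 1)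
    else pvFibDown (res ++ ['0']) n (fib2 - fib1) fib1 (count - 1)
  else res ++ List.replicate count.toNat '0'
termination_by count.toNat
decreasing_by all_goals omega

def convert_decimal_to_fibonacci (n : String) : String :=
  if PySem.Str.strIsdigit n then
    -- n = int(n); isdigit guarantees int() succeeds, so getD 0 is never the default
    let m := (PySem.Int.ofStr? n).getD 0
    if m = 0 then "0"
    else if m < 0 then pvErrMsg   -- 'raise AssertionError', caught by the except-branch
    else
      let s1 := pvFibUp m 1 2 2
      let s2 := if m < s1.2.1 then (s1.2.1 - s1.1, s1.1, s1.2.2 - 1) else s1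
      String.ofList (pvFibDown [] m s2.1 s2.2.1 s2.2.2)
  else pvErrMsg   -- 'assert n.isdigit()' failed, caught by the except-branch

-- ===== PORT B =====
-- 'fibs = []; a, b = 1, 2; while a <= n: fibs.append(a); a, b = b, a + b'
-- (the 'a < b' conjunct is only a termination guard: it holds at the call site and at
--  every reachable state, so the port computes exactly what the Python loop computes)
def pvFibList (n a b : Int) : List Int :=
  if _h : a ≤ n ∧ a < b then a :: pvFibList n b (a + b) else []
termination_by (n + 1 - a).toNat
decreasing_by omega

-- one step of 'for f in reversed(fibs): if n >= f: n -= f; res += "1" else: res += "0"'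
def pvGreedyStep (acc : Int × List Char) (f : Int) : Int × List Char :=
  if f ≤ acc.1 then (acc.1 - f, acc.2 ++ ['1']) else (acc.1, acc.2 ++ ['0'])

def convert_decimal_to_fibonacci_alt (n : String) : String :=
  if PySem.Str.strIsdigit n then
    -- same validation front-matter as before
    let m := (PySem.Int.ofStr? n).getD 0
    if m = 0 then "0"
    else if m < 0 then pvErrMsg
    else String.ofList (((pvFibList m 1 2).reverse.foldl pvGreedyStep (m, [])).2)
  else pvErrMsg

-- ===== PRECONDITION & SPEC =====
def Spec_convert_decimal_to_fibonacci (n : String) (out : String) : Prop := out = convert_decimal_to_fibonacci_alt n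
instance (n : String) (out : String) : Decidable (Spec_convert_decimal_to_fibonacci n out) := by unfold Spec_convert_decimal_to_fibonacci; infer_instance

-- ===== CLAIM (what is proved, stated in full; the proofs are below) =====
def Claim_equal_convert_decimal_to_fibonacci : Prop := ∀ (n : String), Dom_convert_decimal_to_fibonacci n → Spec_convert_decimal_to_fibonacci n (convert_decimal_to_fibonacci n)

-- ===== LEMMAS AND PROOFS =====

-- standard Fibonacci numbers over Int: 0, 1, 1, 2, 3, 5, …
def pvFib : Nat → Int
  | 0 => 0
  | 1 => 1
  | k + 2 => pvFib k + pvFib (k + 1)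

theorem pvFib_pos : ∀ k : Nat, 1 ≤ pvFib (k + 1)
  | 0 => by norm_num [pvFib]
  | 1 => by norm_num [pvFib]
  | (k + 2) => by
      have ha := pvFib_pos k
      have hb : 1 ≤ pvFib (k + 2) := pvFib_pos (k + 1)
      show 1 ≤ pvFib (k + 1) + pvFib (k + 2)
      omega

theorem pvFib_nonneg : ∀ k : Nat, 0 ≤ pvFib k
  | 0 => by norm_num [pvFib]
  | (k + 1) => le_trans (by norm_num) (pvFib_pos k)

theorem pvFib_lt_succ (k : Nat) : pvFib (k + 2) < pvFib (k + 3) := by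
  have h1 := pvFib_pos k
  have h2 : 1 ≤ pvFib (k + 2) := pvFib_pos (k + 1)
  show pvFib (k + 2) < pvFib (k + 1) + pvFib (k + 2)
  omega

-- [pvFib (k+1), pvFib k, …, pvFib 2]: the Fibonacci numbers 1, 2, 3, … ≤ n, largest first
def pvDescFibs : Nat → List Int
  | 0 => []
  | k + 1 => pvFib (k + 2) :: pvDescFibs k

-- accumulator factoring for B's fold
theorem pvGreedy_acc : ∀ (l : List Int) (m : Int) (res : List Char),
    l.foldl pvGreedyStep (m, res) =
      ((l.foldl pvGreedyStep (m, [])).1, res ++ (l.foldl pvGreedyStep (m, [])).2) := by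
  intro l
  induction l with
  | nil => intro m res; simp
  | cons f t ih =>
    intro m res
    simp only [List.foldl_cons, pvGreedyStep, List.nil_append]
    by_cases h : f ≤ m
    · simp only [if_pos h]
      rw [ih (m - f) (res ++ ['1']), ih (m - f) ['1']]
      simp
    · simp only [if_neg h]
      rw [ih m (res ++ ['0']), ih m ['0']]
      simp

-- with n = 0 the greedy fold emits only zeros
theorem pvGreedy_zero : ∀ (k : Nat) (res : List Char),
    (pvDescFibs k).foldl pvGreedyStep (0, res) = (0, res ++ List.replicate k '0') := by
  intro k
  induction k with
  | zero => intro res; simp [pvDescFibs]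
  | succ k ih =>
    intro res
    have hp : 1 ≤ pvFib (k + 2) := pvFib_pos (k + 1)
    simp only [pvDescFibs, List.foldl_cons, pvGreedyStep]
    rw [if_neg (by omega)]
    rw [ih (res ++ ['0'])]
    simp [List.replicate_succ]

-- A's second loop agrees with B's greedy fold over the descending Fibonacci list
theorem pvDown_eq_fold : ∀ (k : Nat) (m : Int) (res : List Char),
    0 ≤ m → m < pvFib (k + 2) →
    pvFibDown res m (pvFib k) (pvFib (k + 1)) (k : Int) =
      res ++ ((pvDescFibs k).foldl pvGreedyStep (m, [])).2 := by
  intro k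
  induction k with
  | zero =>
    intro m res h0 h2
    have : m = 0 := by simp [pvFib] at h2; omega
    subst this
    rw [pvFibDown]
    simp [pvDescFibs]
  | succ k ih =>
    intro m res h0 h2
    by_cases hm : 0 < m
    · rw [pvFibDown]
      rw [dif_pos ⟨hm, by exact_mod_cast Nat.succ_pos k⟩]
      have hsub : pvFib (k + 2) - pvFib (k + 1) = pvFib k := by
        show pvFib k + pvFib (k + 1) - pvFib (k + 1) = pvFib k; ring
      by_cases hb : pvFib (k + 2) ≤ m
      · rw [if_pos hb, hsub]
        have hc : ((Nat.succ k : Nat) : Int) - 1 = (k : Int) := by push_cast; ring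
        rw [hc]
        have hlt : m - pvFib (k + 2) < pvFib (k + 2) := by
          have h3 : m < pvFib (k + 1) + pvFib (k + 2) := h2
          have := pvFib_pos k
          have hmono : pvFib (k + 1) ≤ pvFib (k + 2) := by
            show pvFib (k + 1) ≤ pvFib k + pvFib (k + 1)
            have := pvFib_nonneg k; omega
          omega
        rw [ih (m - pvFib (k + 2)) (res ++ ['1']) (by omega) hlt]
        simp only [pvDescFibs, List.foldl_cons, pvGreedyStep, if_pos hb]
        rw [show ([] : List Char) ++ ['1'] = ['1'] from rfl,
            pvGreedy_acc (pvDescFibs k) (m - pvFib (k + 2)) ['1']]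
        simp
      · rw [if_neg hb, hsub]
        have hc : ((Nat.succ k : Nat) : Int) - 1 = (k : Int) := by push_cast; ring
        rw [hc]
        rw [ih m (res ++ ['0']) h0 (by omega)]
        simp only [pvDescFibs, List.foldl_cons, pvGreedyStep, if_neg hb]
        rw [show ([] : List Char) ++ ['0'] = ['0'] from rfl,
            pvGreedy_acc (pvDescFibs k) m ['0']]
        simp
    · have hm0 : m = 0 := by omega
      subst hm0
      rw [pvFibDown]
      rw [dif_neg (by omega)]
      rw [pvGreedy_zero (k + 1) []]
      simp

-- A's first loop lands on consecutive Fibonacci numbers around n, with the count equal to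
-- the number of Fibonacci numbers collected by B's list builder from the same start
theorem pvUp_eq_list : ∀ (fuel j : Nat) (c n : Int),
    (n + 1 - pvFib (j + 2)).toNat ≤ fuel →
    pvFibUp n (pvFib (j + 1)) (pvFib (j + 2)) c =
      (pvFib (j + (pvFibList n (pvFib (j + 2)) (pvFib (j + 3))).length + 1),
       pvFib (j + (pvFibList n (pvFib (j + 2)) (pvFib (j + 3))).length + 2),
       c + (pvFibList n (pvFib (j + 2)) (pvFib (j + 3))).length) ∧
    n < pvFib (j + (pvFibList n (pvFib (j + 2)) (pvFib (j + 3))).length + 2) := by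
  intro fuel
  induction fuel with
  | zero =>
    intro j c n hf
    have hgt : n < pvFib (j + 2) := by omega
    rw [pvFibUp, dif_neg (by omega)]
    rw [pvFibList, dif_neg (by omega)]
    simp [hgt]
  | succ fuel ih =>
    intro j c n hf
    by_cases hle : pvFib (j + 2) ≤ n
    · have hpos := pvFib_pos j
      have hpos2 : 1 ≤ pvFib (j + 2) := pvFib_pos (j + 1)
      have hlt : pvFib (j + 2) < pvFib (j + 3) := pvFib_lt_succ j
      rw [pvFibUp, dif_pos ⟨hle, by omega⟩]
      rw [pvFibList, dif_pos ⟨hle, by omega⟩]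
      rw [show pvFib (j + 1) + pvFib (j + 2) = pvFib (j + 3) from rfl,
          show pvFib (j + 2) + pvFib (j + 3) = pvFib (j + 4) from rfl]
      obtain ⟨h1, h2⟩ := ih (j + 1) (c + 1) n
        (by show (n + 1 - pvFib (j + 3)).toNat ≤ fuel; omega)
      simp only [show j + 1 + 1 = j + 2 from rfl, show j + 1 + 2 = j + 3 from rfl,
          show j + 1 + 3 = j + 4 from rfl] at h1 h2
      simp only [List.length_cons]
      set L := (pvFibList n (pvFib (j + 3)) (pvFib (j + 4))).length with hL
      constructor
      · rw [h1]
        have a1 : j + 1 + L + 1 = j + (L + 1) + 1 := by omega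
        have a2 : j + 1 + L + 2 = j + (L + 1) + 2 := by omega
        have a3 : c + 1 + (L : Int) = c + ((L + 1 : Nat) : Int) := by push_cast; ring
        rw [a1, a2, a3]
      · have e : j + (L + 1) + 2 = j + 1 + L + 2 := by omega
        rw [e]; exact h2
    · rw [pvFibUp, dif_neg (by omega)]
      rw [pvFibList, dif_neg (by omega)]
      simp
      omega

-- B's ascending list, reversed, is the descending list pvDescFibs
theorem pvList_rev : ∀ (fuel j : Nat) (n : Int),
    (n + 1 - pvFib (j + 2)).toNat ≤ fuel →
    (pvFibList n (pvFib (j + 2)) (pvFib (j + 3))).reverse ++ pvDescFibs j =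
      pvDescFibs (j + (pvFibList n (pvFib (j + 2)) (pvFib (j + 3))).length) := by
  intro fuel
  induction fuel with
  | zero =>
    intro j n hf
    rw [pvFibList, dif_neg (by omega)]
    simp
  | succ fuel ih =>
    intro j n hf
    by_cases hle : pvFib (j + 2) ≤ n
    · have hpos := pvFib_pos j
      have hpos2 : 1 ≤ pvFib (j + 2) := pvFib_pos (j + 1)
      have hlt : pvFib (j + 2) < pvFib (j + 3) := pvFib_lt_succ j
      rw [pvFibList, dif_pos ⟨hle, by omega⟩]
      rw [show pvFib (j + 2) + pvFib (j + 3) = pvFib (j + 4) from rfl]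
      simp only [List.reverse_cons, List.append_assoc, List.length_cons]
      have hd : [pvFib (j + 2)] ++ pvDescFibs j = pvDescFibs (j + 1) := by
        simp [pvDescFibs]
      rw [hd]
      have hrec := ih (j + 1) n (by show (n + 1 - pvFib (j + 3)).toNat ≤ fuel; omega)
      simp only [show j + 1 + 2 = j + 3 from rfl, show j + 1 + 3 = j + 4 from rfl] at hrec
      rw [hrec]
      congr 1
      omega
    · rw [pvFibList, dif_neg (by omega)]
      simp

-- ===== VERDICT (by name: the statement is the Claim_ definition above) =====
theorem convert_decimal_to_fibonacci_spec : Claim_equal_convert_decimal_to_fibonacci := by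
  intro n _
  unfold Spec_convert_decimal_to_fibonacci convert_decimal_to_fibonacci convert_decimal_to_fibonacci_alt
  by_cases hd : PySem.Str.strIsdigit n
  · simp only [if_pos hd]
    set m := (PySem.Int.ofStr? n).getD 0 with hm
    by_cases h0 : m = 0
    · simp [h0]
    · simp only [if_neg h0]
      by_cases hneg : m < 0
      · simp [hneg]
      · simp only [if_neg hneg]
        have hm1 : 1 ≤ m := by omega
        -- peel the first element of B's list: fibs = 1 :: pvFibList m 2 3
        have hcons : pvFibList m 1 2 = 1 :: pvFibList m 2 3 := by
          rw [pvFibList, dif_pos ⟨hm1, by norm_num⟩]; norm_num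
        have hE34 : pvFibList m (pvFib 3) (pvFib 4) = pvFibList m 2 3 := rfl
        set t := (pvFibList m 2 3).length with ht
        -- A's first loop lands on (pvFib (t+2), pvFib (t+3), t+2), with m < pvFib (t+3)
        obtain ⟨hup1, hup2⟩ := pvUp_eq_list (m + 1 - pvFib 3).toNat 1 2 m (le_refl _)
        simp only [show (1 : Nat) + 1 = 2 from rfl, show (1 : Nat) + 2 = 3 from rfl,
          show (1 : Nat) + 3 = 4 from rfl, hE34, ← ht] at hup1 hup2
        rw [show pvFib 2 = (1 : Int) from rfl, show pvFib 3 = (2 : Int) from rfl] at hup1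
        simp only [show ∀ u : Nat, 1 + u + 1 = u + 2 from fun u => by omega,
          show ∀ u : Nat, 1 + u + 2 = u + 3 from fun u => by omega] at hup1 hup2
        rw [hup1]
        -- the post-loop back-shift in A fires (pvFib (t+3) > m) and yields
        -- (pvFib (t+1), pvFib (t+2)) with count t+1
        rw [if_pos (by exact hup2)]
        have hsub : pvFib (t + 3) - pvFib (t + 2) = pvFib (t + 1) := by
          show pvFib (t + 1) + pvFib (t + 2) - pvFib (t + 2) = pvFib (t + 1); ring
        have hcnt : 2 + (t : Int) - 1 = ((t + 1 : Nat) : Int) := by push_cast; ring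
        simp only [hsub, hcnt]
        -- A's second loop = greedy fold over pvDescFibs (t+1)
        rw [pvDown_eq_fold (t + 1) m [] (by omega)
          (by rw [show t + 1 + 2 = t + 3 from rfl]; exact hup2)]
        -- B's reversed list is pvDescFibs (t+1)
        have hrev := pvList_rev (m + 1 - pvFib 2).toNat 0 m (le_refl _)
        simp only [show (0 : Nat) + 2 = 2 from rfl, show (0 : Nat) + 3 = 3 from rfl,
          show pvFibList m (pvFib 2) (pvFib 3) = pvFibList m 1 2 from rfl,
          pvDescFibs, List.append_nil, Nat.zero_add] at hrev
        rw [hcons] at hrev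
        simp only [List.length_cons, ← ht] at hrev
        rw [hcons, hrev]
        simp
  · rw [if_neg hd, if_neg hd]
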